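-- pv_equiv track=rewrite | github.com/embydextrous/Interview | matrix/60-specificPairInMatrix.py | createMaxMatrix
-- ===== SOURCE A (Python) =====
-- def createMaxMatrix(M, R, C):
--     A = [[M[i][j] for j in range(C)] for i in range(R)]
--     for i in range(R-1, -1, -1):
--         for j in range(C-1, -1, -1):
--             if i == R - 1 and j == C - 1:
--                 A[i][j] = M[i][j]
--             elif i == R - 1:
--                 A[i][j] = max(A[i][j+1], M[i][j])
--             elif j == C - 1:
--                 A[i][j] = max(A[i+1][j], M[i][j])
--             else:
--                 A[i][j] = max(A[i+1][j], A[i][j+1], M[i][j])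
--     return A
-- ===== SOURCE B (Python) =====
-- def createMaxMatrix(M, R, C):
--     def suffix_max(xs):
--         out = []
--         cur = None
--         for v in reversed(xs):
--             cur = v if cur is None else max(cur, v)
--             out.append(cur)
--         out.reverse()
--         return out
--
--     # pass 1: row-wise suffix maxima, right to left
--     rowSuf = [suffix_max([M[i][j] for j in range(C)]) for i in range(R)]
--     # pass 2: column-wise suffix maxima of rowSuf, bottom to top
--     res = []
--     prev = None
--     for row in reversed(rowSuf):
--         cur = row if prev is None else [max(a, b) for a, b in zip(row, prev)]
--         res.append(cur)
--         prev = cur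
--     res.reverse()
--     return res
-- ===== Notes on version B (the rewrite author's own statement) =====
-- stated objective: alternative
-- what changed: Replaces the single combined three-way-max bottom-right sweep over a pre-copied R x C table with two separable one-dimensional passes: a right-to-left suffix-max over each row, then a bottom-to-top column-wise max merge of consecutive rows (no index arithmetic, no in-place table).
import Mathlib
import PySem

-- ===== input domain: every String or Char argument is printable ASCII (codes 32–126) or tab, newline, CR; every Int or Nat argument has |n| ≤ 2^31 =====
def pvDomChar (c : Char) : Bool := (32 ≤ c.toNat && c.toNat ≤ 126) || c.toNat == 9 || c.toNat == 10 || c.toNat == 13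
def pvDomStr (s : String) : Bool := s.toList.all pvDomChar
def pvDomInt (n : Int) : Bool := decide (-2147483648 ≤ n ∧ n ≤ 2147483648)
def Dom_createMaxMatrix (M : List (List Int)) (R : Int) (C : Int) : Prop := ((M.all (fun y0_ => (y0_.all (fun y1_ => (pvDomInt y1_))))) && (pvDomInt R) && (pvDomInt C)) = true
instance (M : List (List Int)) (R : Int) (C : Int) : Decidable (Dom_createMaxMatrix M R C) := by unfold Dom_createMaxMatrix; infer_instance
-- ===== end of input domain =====

-- B replaces A's combined three-way-max in-place sweep with two separable one-dimensional
-- passes (row suffix-max, then bottom-up column merge); alternative decomposition, same cost.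


-- ===== PORT A =====
-- M[i][j] (in range on every input Pre_ admits; the getD defaults are never reached there)
def pvGetM (M : List (List Int)) (i j : Int) : Int :=
  PySem.List.pyGetD (PySem.List.pyGetD M i []) j 0

def createMaxMatrix (M : List (List Int)) (R : Int) (C : Int) : List (List Int) :=
  let A0 := (PySem.List.pyRange 0 R 1).map (fun i =>
              (PySem.List.pyRange 0 C 1).map (fun j => pvGetM M i j))
  (PySem.List.pyRange (R-1) (-1) (-1)).foldl (fun A i =>
    (PySem.List.pyRange (C-1) (-1) (-1)).foldl (fun A j =>
      let v : Int :=
        if i = R - 1 ∧ j = C - 1 then pvGetM M i j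
        else if i = R - 1 then max (pvGetM A i (j+1)) (pvGetM M i j)
        else if j = C - 1 then max (pvGetM A (i+1) j) (pvGetM M i j)
        else max (max (pvGetM A (i+1) j) (pvGetM A i (j+1))) (pvGetM M i j)
      -- A[i][j] = v
      PySem.List.pySetD A i (PySem.List.pySetD (PySem.List.pyGetD A i []) j v)) A) A0

-- ===== PORT B =====
-- suffix_max: fold over reversed(xs) carrying (out, cur); append then final reverse, as in Source B
def pvSuffixMax (xs : List Int) : List Int :=
  (xs.reverse.foldl (fun (p : List Int × Option Int) v =>
      let cur := match p.2 with | none => v | some c => max c v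
      (p.1 ++ [cur], some cur)) ([], none)).1.reverse

def createMaxMatrix_alt (M : List (List Int)) (R : Int) (C : Int) : List (List Int) :=
  let rowSuf := (PySem.List.pyRange 0 R 1).map (fun i =>
      pvSuffixMax ((PySem.List.pyRange 0 C 1).map (fun j => pvGetM M i j)))
  (rowSuf.reverse.foldl (fun (p : List (List Int) × Option (List Int)) row =>
      let cur := match p.2 with
        | none => row
        | some prev => (row.zip prev).map (fun ab => max ab.1 ab.2)
      (p.1 ++ [cur], some cur)) ([], none)).1.reverse

-- ===== PRECONDITION & SPEC =====
-- Pre_: exactly where Python A returns normally (it raises IndexError iff R > 0 and C > 0 and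
-- either R exceeds the number of rows or C exceeds the length of one of the first R rows;
-- for R ≤ 0 or C ≤ 0 no element of M is ever indexed, so A returns).
def Pre_createMaxMatrix (M : List (List Int)) (R : Int) (C : Int) : Prop :=
  R ≤ 0 ∨ C ≤ 0 ∨ (R ≤ (M.length : Int) ∧ ∀ row ∈ M.take R.toNat, C ≤ (row.length : Int))
instance (M : List (List Int)) (R : Int) (C : Int) : Decidable (Pre_createMaxMatrix M R C) := by unfold Pre_createMaxMatrix; infer_instance
def pvWitness_createMaxMatrix : List (List Int) × Int × Int := ([[1, 5, 2], [3, 0, 4]], 2, 3)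

def Spec_createMaxMatrix (M : List (List Int)) (R : Int) (C : Int) (out : List (List Int)) : Prop := out = createMaxMatrix_alt M R C
instance (M : List (List Int)) (R : Int) (C : Int) (out : List (List Int)) : Decidable (Spec_createMaxMatrix M R C out) := by unfold Spec_createMaxMatrix; infer_instance

-- ===== CLAIM (what is proved, stated in full; the proofs are below) =====
def Claim_equal_createMaxMatrix : Prop := ∀ (M : List (List Int)) (R : Int) (C : Int), Dom_createMaxMatrix M R C → Pre_createMaxMatrix M R C → Spec_createMaxMatrix M R C (createMaxMatrix M R C)

-- ===== LEMMAS AND PROOFS =====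

-- ---- common spec-side structural functions ----
-- row suffix maxima
def pvSufR : List Int → List Int
  | [] => []
  | x :: rest =>
    match pvSufR rest with
    | [] => [x]
    | y :: t => max y x :: y :: t

def pvZipMax (r s : List Int) : List Int := (r.zip s).map (fun ab => max ab.1 ab.2)

-- bottom-up column merge of already-suffixed rows (B's second pass, structurally)
def pvCmb : List (List Int) → List (List Int)
  | [] => []
  | r :: rest =>
    match pvCmb rest with
    | [] => [r]
    | s :: t => pvZipMax r s :: s :: t

-- one row of A's recurrence given the raw row and the finished row below
def pvRowA : List Int → List Int → List Int
  | x :: m, b :: bs =>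
    (match pvRowA m bs with
     | [] => [max b x]
     | y :: t => max (max b y) x :: y :: t)
  | _, _ => []

-- A's whole table, structurally (bottom row = suffix max, others = pvRowA)
def pvCmbA : List (List Int) → List (List Int)
  | [] => []
  | r :: rest =>
    match pvCmbA rest with
    | [] => [pvSufR r]
    | s :: t => pvRowA r s :: s :: t

def pvMrow (M : List (List Int)) (c : Nat) (i : Nat) : List Int :=
  (List.range c).map (fun j : Nat => pvGetM M (i : Int) (j : Int))
def pvMrows (M : List (List Int)) (n c : Nat) : List (List Int) :=
  (List.range n).map (pvMrow M c)

def pvDesc (k : Nat) : List Int := ((List.range k).map (fun j : Nat => (j : Int))).reverse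
def pvState (M : List (List Int)) (n c k : Nat) : List (List Int) :=
  (List.range k).map (pvMrow M c) ++ (pvCmbA (pvMrows M n c)).drop k

-- ---- generic list facts ----
lemma pvGetD_drop {α : Type} (l : List α) (i m : Nat) (d : α) :
    (l.drop i).getD m d = l.getD (i + m) d := by
  simp [List.getD_eq_getElem?_getD, List.getElem?_drop]

lemma pvDrop_eq_cons {α : Type} (l : List α) (j : Nat) (d : α) (h : j < l.length) :
    l.drop j = l.getD j d :: l.drop (j+1) := by
  rw [List.drop_eq_getElem_cons h]
  simp [List.getD_eq_getElem?_getD, List.getElem?_eq_getElem h]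

-- ---- pvSufR ----
lemma pvSufR_cons (x : Int) (rest : List Int) :
    pvSufR (x :: rest) =
      (match pvSufR rest with | [] => x | y :: _ => max y x) :: pvSufR rest := by
  cases h : pvSufR rest <;> simp [pvSufR, h]

lemma pvSufR_length (m : List Int) : (pvSufR m).length = m.length := by
  induction m with
  | nil => rfl
  | cons x rest ih => rw [pvSufR_cons]; simp [ih]

lemma pvSufR_ne_nil (m : List Int) (h : m ≠ []) : pvSufR m ≠ [] := by
  intro hn
  have := pvSufR_length m
  rw [hn] at this
  exact h (List.length_eq_zero_iff.mp this.symm)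

lemma pvSufR_getD (m : List Int) (j : Nat) (hj : j < m.length) :
    (pvSufR m).getD j 0 =
      if j = m.length - 1 then m.getD j 0
      else max ((pvSufR m).getD (j+1) 0) (m.getD j 0) := by
  induction m generalizing j with
  | nil => simp at hj
  | cons x rest ih =>
    rw [pvSufR_cons]
    cases j with
    | zero =>
      by_cases hres : rest = []
      · subst hres; simp [pvSufR]
      · obtain ⟨y, t, hr⟩ := List.exists_cons_of_ne_nil (pvSufR_ne_nil rest hres)
        have hlen : 0 < rest.length := List.length_pos_iff.mpr hres
        rw [hr]
        rw [if_neg (by simp; omega)]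
        simp
    | succ j =>
      have hj' : j < rest.length := by simpa using hj
      simp only [List.getD_cons_succ]
      rw [ih j hj']
      simp only [List.length_cons]
      by_cases hc : j = rest.length - 1
      · rw [if_pos hc, if_pos (by omega)]
      · rw [if_neg hc, if_neg (by omega)]

lemma pvSufR_chain (m : List Int) : List.IsChain (fun a b => b ≤ a) (pvSufR m) := by
  induction m with
  | nil => simp [pvSufR]
  | cons x rest ih =>
    rw [pvSufR_cons]
    cases hr : pvSufR rest with
    | nil => simp
    | cons y t =>
      rw [hr] at ih
      exact ih.cons (by simp)

-- ---- pvRowA ----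
lemma pvRowA_cons (x : Int) (m : List Int) (b : Int) (bs : List Int) :
    pvRowA (x :: m) (b :: bs) =
      (match pvRowA m bs with | [] => max b x | y :: _ => max (max b y) x) :: pvRowA m bs := by
  cases h : pvRowA m bs <;> simp [pvRowA, h]

lemma pvRowA_length (m : List Int) : ∀ b : List Int, b.length = m.length →
    (pvRowA m b).length = m.length := by
  induction m with
  | nil => intro b hb; rw [List.length_eq_zero_iff.mp hb]; rfl
  | cons x rest ih =>
    intro b hb
    cases b with
    | nil => simp at hb
    | cons b0 bs =>
      rw [pvRowA_cons]
      simp only [List.length_cons] at hb ⊢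
      rw [ih bs (by omega)]

lemma pvRowA_ne_nil (m b : List Int) (hb : b.length = m.length) (h : m ≠ []) : pvRowA m b ≠ [] := by
  intro hn
  have := pvRowA_length m b hb
  rw [hn] at this
  exact h (List.length_eq_zero_iff.mp this.symm)

lemma pvRowA_getD (m : List Int) : ∀ b : List Int, b.length = m.length →
    ∀ j, j < m.length →
    (pvRowA m b).getD j 0 =
      if j = m.length - 1 then max (b.getD j 0) (m.getD j 0)
      else max (max (b.getD j 0) ((pvRowA m b).getD (j+1) 0)) (m.getD j 0) := by
  induction m with
  | nil => intro b hb j hj; simp at hj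
  | cons x rest ih =>
    intro b hb j hj
    cases b with
    | nil => simp at hb
    | cons b0 bs =>
    simp only [List.length_cons] at hb hj
    rw [pvRowA_cons]
    cases j with
    | zero =>
      by_cases hres : rest = []
      · subst hres
        have : bs = [] := by simpa using hb
        subst this
        simp [pvRowA]
      · obtain ⟨y, t, hr⟩ := List.exists_cons_of_ne_nil
          (pvRowA_ne_nil rest bs (by omega) hres)
        have hlen : 0 < rest.length := List.length_pos_iff.mpr hres
        rw [hr, if_neg (by simp; omega)]
        simp
    | succ j =>
      simp only [List.getD_cons_succ]
      rw [ih bs (by omega) j (by omega)]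
      by_cases hc : j = rest.length - 1
      · rw [if_pos hc, if_pos (by simp; omega)]
      · rw [if_neg hc, if_neg (by simp; omega)]

-- separability: A's three-way row recurrence = suffix-max zipped with the (antitone) row below
lemma pvSep (m : List Int) : ∀ b : List Int, b.length = m.length →
    List.IsChain (fun a b => b ≤ a) b → pvRowA m b = pvZipMax (pvSufR m) b := by
  induction m with
  | nil => intro b hb _; rw [List.length_eq_zero_iff.mp hb]; rfl
  | cons x rest ih =>
    intro b hb hch
    cases b with
    | nil => simp at hb
    | cons b0 bs =>
    simp only [List.length_cons] at hb
    rw [pvRowA_cons, pvSufR_cons, ih bs (by omega) hch.tail]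
    cases hr : pvSufR rest with
    | nil =>
      have hrest : rest = [] := by
        by_contra h; exact pvSufR_ne_nil rest h hr
      subst hrest
      have : bs = [] := by simpa using hb
      subst this
      simp [pvZipMax, max_comm]
    | cons y t =>
      have hbs : bs.length = rest.length := by omega
      have : 0 < bs.length := by
        rw [hbs, ← pvSufR_length rest, hr]; simp
      cases bs with
      | nil => simp at this
      | cons b1 bs' =>
        rw [hr] at *
        have hb1 : b1 ≤ b0 := (List.isChain_cons_cons.mp hch).1
        simp only [pvZipMax, List.zip_cons_cons, List.map_cons]
        congr 1
        have hmax : max b0 (max y b1) = max b0 y := by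
          rw [max_comm y b1, ← max_assoc, max_eq_left hb1]
        rw [hmax, max_assoc]
        exact max_comm _ _

lemma pvZipMax_chain (r : List Int) : ∀ s : List Int,
    List.IsChain (fun a b => b ≤ a) r → List.IsChain (fun a b => b ≤ a) s →
    List.IsChain (fun a b => b ≤ a) (pvZipMax r s) := by
  induction r with
  | nil => intro s _ _; simp [pvZipMax]
  | cons a r' ih =>
    intro s hr hs
    cases s with
    | nil => simp [pvZipMax]
    | cons b s' =>
      cases r' with
      | nil => simp [pvZipMax]
      | cons a' r'' =>
        cases s' with
        | nil => simp [pvZipMax]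
        | cons b' s'' =>
          have hz : pvZipMax (a :: a' :: r'') (b :: b' :: s'') =
              max a b :: pvZipMax (a' :: r'') (b' :: s'') := by simp [pvZipMax]
          rw [hz]
          refine (ih (b' :: s'') hr.tail hs.tail).cons ?_
          intro y hy
          have h3 : max a' b' = y := by simpa [pvZipMax] using hy
          subst h3
          exact max_le_max (List.isChain_cons_cons.mp hr).1 (List.isChain_cons_cons.mp hs).1

-- ---- pvCmbA / pvCmb ----
lemma pvCmbA_cons (r : List Int) (rest : List (List Int)) :
    pvCmbA (r :: rest) =
      (match pvCmbA rest with | [] => pvSufR r | s :: _ => pvRowA r s) :: pvCmbA rest := by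
  cases h : pvCmbA rest <;> simp [pvCmbA, h]

lemma pvCmbA_length (rows : List (List Int)) : (pvCmbA rows).length = rows.length := by
  induction rows with
  | nil => rfl
  | cons r rest ih => rw [pvCmbA_cons]; simp [ih]

lemma pvCmbA_ne_nil (rows : List (List Int)) (h : rows ≠ []) : pvCmbA rows ≠ [] := by
  intro hn
  have := pvCmbA_length rows
  rw [hn] at this
  exact h (List.length_eq_zero_iff.mp this.symm)

lemma pvCmbA_getD (rows : List (List Int)) : ∀ k, k < rows.length →
    (pvCmbA rows).getD k [] =
      if k = rows.length - 1 then pvSufR (rows.getD k [])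
      else pvRowA (rows.getD k []) ((pvCmbA rows).getD (k+1) []) := by
  induction rows with
  | nil => intro k hk; simp at hk
  | cons r rest ih =>
    intro k hk
    rw [pvCmbA_cons]
    cases k with
    | zero =>
      by_cases hres : rest = []
      · subst hres; simp [pvCmbA]
      · obtain ⟨s, t, hr⟩ := List.exists_cons_of_ne_nil (pvCmbA_ne_nil rest hres)
        have hlen : 0 < rest.length := List.length_pos_iff.mpr hres
        rw [hr, if_neg (by simp; omega)]
        simp
    | succ k =>
      have hk' : k < rest.length := by simpa using hk
      simp only [List.getD_cons_succ]
      rw [ih k hk']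
      by_cases hc : k = rest.length - 1
      · rw [if_pos hc, if_pos (by simp; omega)]
      · rw [if_neg hc, if_neg (by simp; omega)]

lemma pvCmb_cons (r : List Int) (rest : List (List Int)) :
    pvCmb (r :: rest) =
      (match pvCmb rest with | [] => r | s :: _ => pvZipMax r s) :: pvCmb rest := by
  cases h : pvCmb rest <;> simp [pvCmb, h]

-- bridge: A's structural table = B's two passes, given equal row lengths
lemma pvBridge (L : Nat) : ∀ rows : List (List Int), (∀ r ∈ rows, r.length = L) →
    pvCmbA rows = pvCmb (rows.map pvSufR) ∧
    ∀ r ∈ pvCmb (rows.map pvSufR), r.length = L ∧ List.IsChain (fun a b => b ≤ a) r := by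
  intro rows
  induction rows with
  | nil => intro _; exact ⟨rfl, by simp [pvCmb]⟩
  | cons r rest ih =>
    intro hlen
    obtain ⟨heq, hprop⟩ := ih (fun r' hr' => hlen r' (List.mem_cons_of_mem _ hr'))
    have hrL : r.length = L := hlen r List.mem_cons_self
    rw [pvCmbA_cons, List.map_cons, pvCmb_cons, heq]
    cases hc : pvCmb (rest.map pvSufR) with
    | nil =>
      refine ⟨rfl, ?_⟩
      intro r' hr'
      have : r' = pvSufR r := by simpa using hr'
      subst this
      exact ⟨by rw [pvSufR_length, hrL], pvSufR_chain r⟩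
    | cons s t =>
      have hs := hprop s (by rw [hc]; exact List.mem_cons_self)
      have hsep : pvRowA r s = pvZipMax (pvSufR r) s :=
        pvSep r s (by rw [hs.1, hrL]) hs.2
      refine ⟨by show pvRowA r s :: s :: t = pvZipMax (pvSufR r) s :: s :: t; rw [hsep], ?_⟩
      intro r' hr'
      rcases List.mem_cons.mp (show r' ∈ pvZipMax (pvSufR r) s :: s :: t from hr') with h | h
      · subst h
        constructor
        · simp [pvZipMax, pvSufR_length, hrL, hs.1]
        · exact pvZipMax_chain (pvSufR r) s (pvSufR_chain r) hs.2
      · exact hprop r' (by rw [hc]; exact h)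

-- ---- ranges ----
lemma pvRange_up (X : Int) :
    PySem.List.pyRange 0 X 1 = (List.range X.toNat).map (fun k : Nat => (k : Int)) := by
  rw [PySem.List.pyRange_one, show X - 0 = X from by ring]
  exact List.map_congr_left (fun a _ => by simp)

lemma pvRange_down (X : Int) :
    PySem.List.pyRange (X - 1) (-1) (-1) = pvDesc X.toNat := by
  rw [PySem.List.pyRange_neg_one_eq_reverse,
    show (-1 : Int) + 1 = 0 from by norm_num, show X - 1 + 1 = X from by ring,
    pvRange_up, pvDesc]

lemma pvDesc_succ (k : Nat) : pvDesc (k+1) = (k : Int) :: pvDesc k := by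
  simp [pvDesc, List.range_succ]

-- ---- B side: the folds compute the structural functions ----
lemma pvSufCore (xs : List Int) :
    xs.reverse.foldl (fun (p : List Int × Option Int) v =>
      let cur := match p.2 with | none => v | some c => max c v
      (p.1 ++ [cur], some cur)) ([], none)
    = ((pvSufR xs).reverse, (pvSufR xs).head?) := by
  induction xs with
  | nil => simp [pvSufR]
  | cons x rest ih =>
    rw [List.reverse_cons, List.foldl_append, ih, pvSufR_cons]
    cases hr : pvSufR rest with
    | nil => simp
    | cons y t => simp

lemma pvSuffixMax_eq (xs : List Int) : pvSuffixMax xs = pvSufR xs := by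
  rw [pvSuffixMax, pvSufCore]; simp

lemma pvCmbCore (rows : List (List Int)) :
    rows.reverse.foldl (fun (p : List (List Int) × Option (List Int)) row =>
      let cur := match p.2 with
        | none => row
        | some prev => (row.zip prev).map (fun ab => max ab.1 ab.2)
      (p.1 ++ [cur], some cur)) ([], none)
    = ((pvCmb rows).reverse, (pvCmb rows).head?) := by
  induction rows with
  | nil => simp [pvCmb]
  | cons r rest ih =>
    rw [List.reverse_cons, List.foldl_append, ih, pvCmb_cons]
    cases hr : pvCmb rest with
    | nil => simp
    | cons s t => simp [pvZipMax]

lemma pvAlt_eq (M : List (List Int)) (R C : Int) :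
    createMaxMatrix_alt M R C = pvCmb ((pvMrows M R.toNat C.toNat).map pvSufR) := by
  simp only [createMaxMatrix_alt, pvRange_up, List.map_map, pvSuffixMax_eq, Function.comp_def]
  rw [pvCmbCore]
  simp only [List.reverse_reverse]
  congr 1
  simp only [pvMrows, List.map_map, pvMrow, Function.comp_def]

-- ---- A side: the imperative double fold computes pvCmbA ----
lemma pvMrow_length (M : List (List Int)) (c i : Nat) : (pvMrow M c i).length = c := by
  simp [pvMrow]

lemma pvMrow_getD (M : List (List Int)) (c i j : Nat) (hj : j < c) :
    (pvMrow M c i).getD j 0 = pvGetM M i j := by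
  simp only [pvMrow, List.getD_eq_getElem?_getD, List.getElem?_map, List.getElem?_range hj,
    Option.map_some, Option.getD_some]

lemma pvMrows_length (M : List (List Int)) (n c : Nat) : (pvMrows M n c).length = n := by
  simp [pvMrows]

lemma pvMrows_getD (M : List (List Int)) (n c k : Nat) (hk : k < n) :
    (pvMrows M n c).getD k [] = pvMrow M c k := by
  simp only [pvMrows, List.getD_eq_getElem?_getD, List.getElem?_map, List.getElem?_range hk,
    Option.map_some, Option.getD_some]

lemma pvMrows_mem_len (M : List (List Int)) (n c : Nat) :
    ∀ r ∈ pvMrows M n c, r.length = c := by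
  intro r hr
  simp only [pvMrows, List.mem_map] at hr
  obtain ⟨i, _, rfl⟩ := hr
  exact pvMrow_length M c i

lemma pvCmbA_mem_len (M : List (List Int)) (n c : Nat) :
    ∀ r ∈ pvCmbA (pvMrows M n c), r.length = c := by
  intro r hr
  have hb := pvBridge c (pvMrows M n c) (pvMrows_mem_len M n c)
  rw [hb.1] at hr
  exact (hb.2 r hr).1

lemma pvState_length (M : List (List Int)) (n c k : Nat) (hn : k ≤ n) :
    (pvState M n c k).length = n := by
  simp [pvState, pvCmbA_length, pvMrows_length]
  omega

lemma pvState_getD_ge (M : List (List Int)) (n c k m : Nat) (hk : k ≤ m) :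
    (pvState M n c k).getD m [] = (pvCmbA (pvMrows M n c)).getD m [] := by
  simp only [pvState]
  rw [List.getD_append_right _ _ _ _ (by simpa using hk)]
  simp only [List.length_map, List.length_range]
  rw [pvGetD_drop]
  congr 1
  omega

lemma pvPrefixSet {α : Type} (f : Nat → α) (l : List α) (k : Nat) (hk : k < l.length) :
    (((List.range k).map f ++ l.drop k).set k (f k)) = (List.range (k+1)).map f ++ l.drop (k+1) := by
  rw [List.set_append_right _ _ (by simp : ((List.range k).map f).length ≤ k)]
  simp only [List.length_map, List.length_range, Nat.sub_self]
  rw [pvDrop_eq_cons l k (f k) hk, List.set_cons_zero, List.range_succ, List.map_append]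
  simp

lemma pvPrefixKeep {α : Type} (f : Nat → α) (l : List α) (d : α) (k : Nat) (hk : k < l.length) :
    (((List.range k).map f ++ l.drop k).set k (l.getD k d)) = (List.range k).map f ++ l.drop k := by
  rw [List.set_append_right _ _ (by simp : ((List.range k).map f).length ≤ k)]
  simp only [List.length_map, List.length_range, Nat.sub_self]
  rw [pvDrop_eq_cons l k d hk, List.set_cons_zero]

lemma pvInner (M : List (List Int)) (R C : Int) (c : Nat) (k : Nat)
    (A : List (List Int)) (hk : k < A.length) (T : List Int) (hT : T.length = c)
    (hrec : ∀ j, j < c → T.getD j 0 =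
      (if ((k : Int) = R - 1 ∧ (j : Int) = C - 1) then pvGetM M k j
       else if (k : Int) = R - 1 then max (T.getD (j+1) 0) (pvGetM M k j)
       else if (j : Int) = C - 1 then max ((A.getD (k+1) []).getD j 0) (pvGetM M k j)
       else max (max ((A.getD (k+1) []).getD j 0) (T.getD (j+1) 0)) (pvGetM M k j))) :
    ∀ j, j ≤ c → ∀ r : List Int, r.length = c → r.drop j = T.drop j →
      (pvDesc j).foldl (fun B jj =>
        PySem.List.pySetD B (k : Int) (PySem.List.pySetD (PySem.List.pyGetD B (k : Int) []) jj
          (if ((k : Int) = R - 1 ∧ jj = C - 1) then pvGetM M (k : Int) jj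
           else if (k : Int) = R - 1 then max (pvGetM B (k : Int) (jj+1)) (pvGetM M (k : Int) jj)
           else if jj = C - 1 then max (pvGetM B ((k : Int)+1) jj) (pvGetM M (k : Int) jj)
           else max (max (pvGetM B ((k : Int)+1) jj) (pvGetM B (k : Int) (jj+1))) (pvGetM M (k : Int) jj))))
        (A.set k r)
      = A.set k T := by
  intro j
  induction j with
  | zero =>
    intro _ r _ hdrop
    have hrT : r = T := by simpa using hdrop
    rw [hrT]
    simp [pvDesc]
  | succ j ih =>
    intro hj r hr hdrop
    have hjc : j < c := by omega
    rw [pvDesc_succ]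
    simp only [List.foldl_cons]
    have hrowget : PySem.List.pyGetD (A.set k r) ((k : Nat) : Int) [] = r := by
      rw [PySem.List.pyGetD_natCast]
      simp [List.getD_eq_getElem?_getD, List.getElem?_set_self hk]
    have hbelow : PySem.List.pyGetD (A.set k r) (((k : Nat) : Int)+1) [] = A.getD (k+1) [] := by
      rw [show (((k : Nat) : Int)+1) = (((k+1 : Nat) : Nat) : Int) from by push_cast; ring,
        PySem.List.pyGetD_natCast]
      simp [List.getD_eq_getElem?_getD, List.getElem?_set_ne (by omega : k ≠ k + 1)]
    have hread : r.getD (j+1) 0 = T.getD (j+1) 0 := by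
      have := congrArg (fun l => List.getD l 0 (0 : Int)) hdrop
      simpa [pvGetD_drop] using this
    have hgm1 : pvGetM (A.set k r) ((k : Nat) : Int) (((j : Nat) : Int)+1) = T.getD (j+1) 0 := by
      rw [pvGetM, hrowget, show (((j : Nat) : Int)+1) = (((j+1 : Nat) : Nat) : Int) from by push_cast; ring,
        PySem.List.pyGetD_natCast, hread]
    have hgm2 : pvGetM (A.set k r) (((k : Nat) : Int)+1) ((j : Nat) : Int) = (A.getD (k+1) []).getD j 0 := by
      rw [pvGetM, hbelow, PySem.List.pyGetD_natCast]
    rw [hrowget, hgm1, hgm2, ← hrec j hjc,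
      PySem.List.pySetD_natCast, PySem.List.pySetD_natCast, List.set_set]
    have hlen' : (r.set j (T.getD j 0)).length = c := by rw [List.length_set, hr]
    have hdrop' : (r.set j (T.getD j 0)).drop j = T.drop j := by
      rw [pvDrop_eq_cons (r.set j (T.getD j 0)) j 0 (by rw [hlen']; exact hjc),
        pvDrop_eq_cons T j 0 (by rw [hT]; exact hjc)]
      congr 1
      · simp [List.getD_eq_getElem?_getD, List.getElem?_set_self (by rw [hr]; exact hjc)]
      · have hds : (r.set j (T.getD j 0)).drop (j+1) = r.drop (j+1) := by
          simp [List.drop_set]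
        rw [hds, hdrop]
    exact ih (by omega) (r.set j (T.getD j 0)) hlen' (by
      rw [show (r.set j (T.getD j 0)).drop j = T.drop j from hdrop'])

lemma pvOuter (M : List (List Int)) (R C : Int) (n c : Nat)
    (hR : 0 < n → R = (n : Int)) (hC : 0 < c → C = (c : Int)) :
    ∀ k, k ≤ n →
    (pvDesc k).foldl (fun A i =>
      (pvDesc c).foldl (fun B j =>
        PySem.List.pySetD B i (PySem.List.pySetD (PySem.List.pyGetD B i []) j
          (if (i = R - 1 ∧ j = C - 1) then pvGetM M i j
           else if i = R - 1 then max (pvGetM B i (j+1)) (pvGetM M i j)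
           else if j = C - 1 then max (pvGetM B (i+1) j) (pvGetM M i j)
           else max (max (pvGetM B (i+1) j) (pvGetM B i (j+1))) (pvGetM M i j)))) A)
      (pvState M n c k)
    = pvCmbA (pvMrows M n c) := by
  intro k
  induction k with
  | zero =>
    intro _
    simp [pvDesc, pvState]
  | succ k ih =>
    intro hk1
    have hkn : k < n := by omega
    have hR' : R = (n : Int) := hR (by omega)
    have hrowsn : (pvMrows M n c).length = n := pvMrows_length M n c
    have hcmbn : (pvCmbA (pvMrows M n c)).length = n := by
      rw [pvCmbA_length, hrowsn]
    set T : List Int := (pvCmbA (pvMrows M n c)).getD k [] with hTdef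
    have hTmem : T ∈ pvCmbA (pvMrows M n c) := by
      rw [hTdef, List.getD_eq_getElem _ _ (by omega)]
      exact List.getElem_mem _
    have hTlen : T.length = c := pvCmbA_mem_len M n c T hTmem
    have hstate : pvState M n c (k+1) = (pvState M n c k).set k (pvMrow M c k) := by
      simp only [pvState]
      exact (pvPrefixSet (pvMrow M c) (pvCmbA (pvMrows M n c)) k (by omega)).symm
    have hcmbk := pvCmbA_getD (pvMrows M n c) k (by omega)
    rw [pvMrows_getD M n c k hkn, hrowsn] at hcmbk
    have hrec : ∀ j, j < c → T.getD j 0 =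
        (if ((k : Int) = R - 1 ∧ (j : Int) = C - 1) then pvGetM M k j
         else if (k : Int) = R - 1 then max (T.getD (j+1) 0) (pvGetM M k j)
         else if (j : Int) = C - 1 then max (((pvState M n c k).getD (k+1) []).getD j 0) (pvGetM M k j)
         else max (max (((pvState M n c k).getD (k+1) []).getD j 0) (T.getD (j+1) 0)) (pvGetM M k j)) := by
      intro j hj
      have hCc : C = (c : Int) := hC (by omega)
      have hjC : ((j : Int) = C - 1) ↔ (j = c - 1) := by omega
      have hkR : ((k : Int) = R - 1) ↔ (k = n - 1) := by omega
      rw [pvState_getD_ge M n c k (k+1) (by omega)]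
      by_cases hbot : k = n - 1
      · rw [hTdef, hcmbk, if_pos hbot]
        rw [pvSufR_getD (pvMrow M c k) j (by rw [pvMrow_length]; exact hj), pvMrow_length]
        by_cases hj2 : j = c - 1
        · rw [if_pos hj2, if_pos ⟨hkR.mpr hbot, hjC.mpr hj2⟩, pvMrow_getD M c k j hj]
        · rw [if_neg hj2, if_neg (fun h => hj2 (hjC.mp h.2)), if_pos (hkR.mpr hbot),
            pvMrow_getD M c k j hj]
      · have hk1n : k + 1 < n := by omega
        set bel : List Int := (pvCmbA (pvMrows M n c)).getD (k+1) [] with hbeldef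
        have hbelmem : bel ∈ pvCmbA (pvMrows M n c) := by
          rw [hbeldef, List.getD_eq_getElem _ _ (by omega)]
          exact List.getElem_mem _
        have hbellen : bel.length = c := pvCmbA_mem_len M n c bel hbelmem
        rw [hTdef, hcmbk, if_neg hbot]
        rw [pvRowA_getD (pvMrow M c k) bel (by rw [hbellen, pvMrow_length]) j
          (by rw [pvMrow_length]; exact hj), pvMrow_length]
        by_cases hj2 : j = c - 1
        · rw [if_pos hj2, if_neg (fun h => hbot (hkR.mp h.1)), if_neg (fun h => hbot (hkR.mp h)),
            if_pos (hjC.mpr hj2), pvMrow_getD M c k j hj]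
        · rw [if_neg hj2, if_neg (fun h => hbot (hkR.mp h.1)), if_neg (fun h => hbot (hkR.mp h)),
            if_neg (fun h => hj2 (hjC.mp h)), pvMrow_getD M c k j hj]
    rw [pvDesc_succ]
    simp only [List.foldl_cons]
    rw [hstate]
    rw [pvInner M R C c k (pvState M n c k)
      (by rw [pvState_length M n c k (by omega)]; exact hkn) T hTlen hrec c le_rfl
      (pvMrow M c k) (pvMrow_length M c k)
      (by rw [List.drop_of_length_le (by rw [pvMrow_length]), List.drop_of_length_le (by rw [hTlen])])]
    have hkeep : (pvState M n c k).set k T = pvState M n c k := by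
      simp only [pvState, hTdef]
      exact pvPrefixKeep (pvMrow M c) (pvCmbA (pvMrows M n c)) [] k (by omega)
    rw [hkeep]
    exact ih (by omega)

lemma pvState_top (M : List (List Int)) (n c : Nat) : pvState M n c n = pvMrows M n c := by
  simp only [pvState]
  rw [List.drop_of_length_le (by rw [pvCmbA_length, pvMrows_length]), List.append_nil]
  rfl

lemma pvA_eq (M : List (List Int)) (R C : Int) :
    createMaxMatrix M R C = pvCmbA (pvMrows M R.toNat C.toNat) := by
  have h := pvOuter M R C R.toNat C.toNat (fun h => by omega) (fun h => by omega) R.toNat le_rfl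
  rw [pvState_top] at h
  simp only [createMaxMatrix, pvRange_up, pvRange_down]
  rw [show ((List.range R.toNat).map (fun k : Nat => (k : Int))).map
      (fun i => ((List.range C.toNat).map (fun k : Nat => (k : Int))).map (fun j => pvGetM M i j))
      = pvMrows M R.toNat C.toNat from by
    simp [pvMrows, pvMrow, List.map_map, Function.comp_def]]
  exact h

-- ===== VERDICT (by name: the statement is the Claim_ definition above) =====
theorem createMaxMatrix_spec : Claim_equal_createMaxMatrix := by
  intro M R C _ _
  unfold Spec_createMaxMatrix
  rw [pvA_eq, pvAlt_eq]
  exact (pvBridge C.toNat (pvMrows M R.toNat C.toNat) (pvMrows_mem_len M R.toNat C.toNat)).1
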